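-- pv_equiv track=rewrite | github.com/Parsa-Hajian/universitybox | universitybox/survey/_surveymonkey.py | _build_col_names
-- ===== SOURCE A (Python) =====
-- from typing import Dict, List, Optional, Tuple
--
-- def _build_col_names(
--     row0: List[str], row1: List[str]
-- ) -> List[str]:
--     """
--     Combine question text (row0) and sub-label (row1) into unique column names.
--
--     For metadata / single-answer questions: use row0 only.
--     For matrix / multi-select: use "QuestionText__SubLabel".
--     Deduplicate by appending __2, __3, etc.
--     """
--     result = []
--     seen: Dict[str, int] = {}
--     prev_q = ""
--
--     for q, sub in zip(row0, row1):
--         q = q.strip()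
--         sub = sub.strip()
--
--         # Carry forward empty question text (happens in expanded exports)
--         if not q and prev_q:
--             q = prev_q
--         else:
--             prev_q = q
--
--         if sub and sub.lower() not in ("response", ""):
--             name = f"{q}__{sub}"
--         else:
--             name = q
--
--         # Deduplicate
--         if name in seen:
--             seen[name] += 1
--             name = f"{name}__{seen[name]}"
--         else:
--             seen[name] = 1
--
--         result.append(name)
--
--     return result
-- ===== SOURCE B (Python) =====
-- from typing import List
--
--
-- def _build_col_names(row0: List[str], row1: List[str]) -> List[str]:
--     # Stateless, index-based recomputation: no running prev_q and no seen dict.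
--     qs = [q.strip() for q in row0[:len(row1)]]
--     subs = [s.strip() for s in row1[:len(row0)]]
--
--     names = []
--     for i, sub in enumerate(subs):
--         # effective question text = last non-empty stripped entry of row0 so far
--         q = next((x for x in reversed(qs[:i + 1]) if x), "")
--         names.append(f"{q}__{sub}" if sub and sub.lower() != "response" else q)
--
--     # deduplicate: the k-th occurrence (k >= 2) of a raw name gets "__k"
--     return [n if (c := names[:i].count(n)) == 0 else f"{n}__{c + 1}"
--             for i, n in enumerate(names)]
-- ===== Notes on version B (the rewrite author's own statement) =====
-- stated objective: alternative
-- what changed: A's single stateful loop (result list, seen-count dict and prev_q carried together) is replaced by a stateless index-based recomputation: the effective question text is recomputed per position as the last non-empty stripped entry of the preceding row0 prefix, and duplicates are resolved without any dict by counting the raw name among the preceding raw names; this trades A's O(n) dict loop for O(n^2) prefix scans.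
import Mathlib
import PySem

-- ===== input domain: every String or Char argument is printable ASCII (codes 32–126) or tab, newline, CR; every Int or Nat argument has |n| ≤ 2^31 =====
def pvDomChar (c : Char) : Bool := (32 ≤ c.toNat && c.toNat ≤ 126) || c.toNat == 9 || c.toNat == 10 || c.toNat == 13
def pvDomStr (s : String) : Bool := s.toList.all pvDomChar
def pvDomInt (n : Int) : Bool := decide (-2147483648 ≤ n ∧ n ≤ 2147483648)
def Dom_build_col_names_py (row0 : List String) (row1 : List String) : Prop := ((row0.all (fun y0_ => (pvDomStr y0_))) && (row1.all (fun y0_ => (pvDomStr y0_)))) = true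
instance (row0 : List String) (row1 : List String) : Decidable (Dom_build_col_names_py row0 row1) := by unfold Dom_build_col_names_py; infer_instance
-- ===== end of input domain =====

-- B replaces A's single stateful loop (result list, seen-dict, prev_q carried together) by a
-- stateless index-based recomputation: each name is computed directly from prefixes of the
-- input, and duplicates by counting the name in the preceding raw names (objective:
-- alternative; B trades A's O(n) dict loop for O(n^2) prefix scans).

-- ===== PORT A =====
-- one iteration of A's single loop; state = (result, seen, prev_q)
def bcnStepA (st : List String × PySem.Dict String Int × String)
    (p : String × String) : List String × PySem.Dict String Int × String :=
  let q0 := PySem.Str.strip p.1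
  let sub := PySem.Str.strip p.2
  -- carry forward empty question text; else prev_q = q
  let q := if q0 = "" ∧ st.2.2 ≠ "" then st.2.2 else q0
  let prev := if q0 = "" ∧ st.2.2 ≠ "" then st.2.2 else q0
  let name := if sub ≠ "" ∧ ¬ (PySem.Str.lower sub = "response" ∨ PySem.Str.lower sub = "")
    then q ++ "__" ++ sub else q
  if st.2.1.contains name then
    let seen' := st.2.1.modify name 0 (· + 1)
    (st.1 ++ [name ++ "__" ++ PySem.Int.toStr (seen'.getD name 0)], seen', prev)
  else
    (st.1 ++ [name], st.2.1.insert name 1, prev)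

def build_col_names_py (row0 : List String) (row1 : List String) : List String :=
  ((row0.zip row1).foldl bcnStepA ([], PySem.Dict.empty, "")).1

-- ===== PORT B =====
-- qs = [q.strip() for q in row0[:len(row1)]]; subs likewise
def bcnQs (row0 : List String) (row1 : List String) : List String :=
  (PySem.List.slice row0 none (some (PySem.List.len row1))).map PySem.Str.strip

def bcnSubs (row0 : List String) (row1 : List String) : List String :=
  (PySem.List.slice row1 none (some (PySem.List.len row0))).map PySem.Str.strip

-- names[i] built from the last non-empty entry of qs[:i+1]  (next(..., "") ≈ find?/getD)
def bcnNames (row0 : List String) (row1 : List String) : List String :=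
  (PySem.List.enumerate (bcnSubs row0 row1) 0).map (fun p =>
    let q := ((PySem.List.slice (bcnQs row0 row1) none (some (p.1 + 1))).reverse.find?
                (fun x => decide (x ≠ ""))).getD ""
    if p.2 ≠ "" ∧ PySem.Str.lower p.2 ≠ "response" then q ++ "__" ++ p.2 else q)

-- dedup by counting the name among the preceding raw names
def build_col_names_py_alt (row0 : List String) (row1 : List String) : List String :=
  (PySem.List.enumerate (bcnNames row0 row1) 0).map (fun p =>
    let c := PySem.List.count (PySem.List.slice (bcnNames row0 row1) none (some p.1)) p.2
    if c = 0 then p.2 else p.2 ++ "__" ++ PySem.Int.toStr ((c : Int) + 1))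

-- ===== PRECONDITION & SPEC =====
def Spec_build_col_names_py (row0 : List String) (row1 : List String) (out : List String) : Prop := out = build_col_names_py_alt row0 row1
instance (row0 : List String) (row1 : List String) (out : List String) : Decidable (Spec_build_col_names_py row0 row1 out) := by unfold Spec_build_col_names_py; infer_instance

-- ===== CLAIM (what is proved, stated in full; the proofs are below) =====
def Claim_equal_build_col_names_py : Prop := ∀ (row0 : List String) (row1 : List String), Dom_build_col_names_py row0 row1 → Spec_build_col_names_py row0 row1 (build_col_names_py row0 row1)

-- ===== LEMMAS AND PROOFS =====

-- Proof-only middlemen: a staged (fill / raw-name / counter-dedup) decomposition that both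
-- ports are proved equal to.
def bcnFill (prev : String) : List (String × String) → List (String × String)
  | [] => []
  | (q, sub) :: rest =>
      let prev' := if PySem.Str.strip q = "" then prev else PySem.Str.strip q
      (prev', PySem.Str.strip sub) :: bcnFill prev' rest

def bcnRaw (p : String × String) : String :=
  if p.2 ≠ "" ∧ PySem.Str.lower p.2 ≠ "response" then p.1 ++ "__" ++ p.2 else p.1

def bcnDedup (seen : PySem.Dict String Int) : List String → List String
  | [] => []
  | name :: rest =>
      let n := seen.getD name 0 + 1
      (if n = 1 then name else name ++ "__" ++ PySem.Int.toStr n)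
        :: bcnDedup (seen.insert name n) rest

-- a non-empty string lowercases to a non-empty string
theorem bcn_lower_ne_empty (s : String) (h : s ≠ "") : PySem.Str.lower s ≠ "" := by
  simpa [PySem.Str.lower, PySem.Chars.lower] using h

-- invariant of A's seen-dict: every stored count is ≥ 1
def bcnInv (seen : PySem.Dict String Int) : Prop :=
  ∀ k, seen.contains k = true → 1 ≤ seen.getD k 0

theorem bcnInv_insert (seen : PySem.Dict String Int) (name : String) (v : Int)
    (hv : 1 ≤ v) (h : bcnInv seen) : bcnInv (seen.insert name v) := by
  intro k hk
  rw [PySem.Dict.getD_insert]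
  by_cases hkn : k = name
  · simpa [hkn] using hv
  · rw [PySem.Dict.contains_insert] at hk
    simp [hkn] at hk
    exact if_neg hkn ▸ h k hk

-- A's fused fold = the staged fill/raw/dedup composition
theorem bcn_main (l : List (String × String)) :
    ∀ (acc : List String) (seen : PySem.Dict String Int) (prev : String),
    bcnInv seen →
    (l.foldl bcnStepA (acc, seen, prev)).1
      = acc ++ bcnDedup seen ((bcnFill prev l).map bcnRaw) := by
  induction l with
  | nil => intro acc seen prev _; simp [bcnFill, bcnDedup]
  | cons p rest ih =>
    intro acc seen prev hinv
    obtain ⟨a, b⟩ := p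
    set q0 := PySem.Str.strip a with hq0
    set sub := PySem.Str.strip b with hsub
    have hq : (if q0 = "" ∧ prev ≠ "" then prev else q0)
        = (if q0 = "" then prev else q0) := by
      by_cases h1 : q0 = ""
      · by_cases h2 : prev = "" <;> simp [h1, h2]
      · simp [h1]
    have hcond : (sub ≠ "" ∧ ¬ (PySem.Str.lower sub = "response" ∨ PySem.Str.lower sub = ""))
        ↔ (sub ≠ "" ∧ PySem.Str.lower sub ≠ "response") := by
      constructor
      · rintro ⟨h1, h2⟩; exact ⟨h1, fun h => h2 (Or.inl h)⟩
      · rintro ⟨h1, h2⟩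
        exact ⟨h1, fun h => h.elim h2 (bcn_lower_ne_empty sub h1)⟩
    set prev' := if q0 = "" then prev else q0 with hprev'
    set name := bcnRaw (prev', sub) with hname
    have hstep : bcnStepA (acc, seen, prev) (a, b)
        = (acc ++ [if seen.getD name 0 + 1 = 1 then name
                    else name ++ "__" ++ PySem.Int.toStr (seen.getD name 0 + 1)],
           seen.insert name (seen.getD name 0 + 1), prev') := by
      show (let q0' := PySem.Str.strip a
            let sub' := PySem.Str.strip b
            let q := if q0' = "" ∧ prev ≠ "" then prev else q0'
            let prevn := if q0' = "" ∧ prev ≠ "" then prev else q0'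
            let nm := if sub' ≠ "" ∧ ¬ (PySem.Str.lower sub' = "response" ∨ PySem.Str.lower sub' = "")
              then q ++ "__" ++ sub' else q
            if seen.contains nm then
              let seen' := seen.modify nm 0 (· + 1)
              (acc ++ [nm ++ "__" ++ PySem.Int.toStr (seen'.getD nm 0)], seen', prevn)
            else (acc ++ [nm], seen.insert nm 1, prevn)) = _
      simp only [← hq0, ← hsub, hq]
      have hnm : (if sub ≠ "" ∧ ¬ (PySem.Str.lower sub = "response" ∨ PySem.Str.lower sub = "")
          then prev' ++ "__" ++ sub else prev') = name := by
        rw [hname]; unfold bcnRaw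
        by_cases hc : sub ≠ "" ∧ PySem.Str.lower sub ≠ "response"
        · rw [if_pos (hcond.mpr hc), if_pos hc]
        · rw [if_neg (fun h => hc (hcond.mp h)), if_neg hc]
      simp only [hnm]
      by_cases hc : seen.contains name
      · have h1 : 1 ≤ seen.getD name 0 := hinv name hc
        have hmod : seen.modify name 0 (· + 1) = seen.insert name (seen.getD name 0 + 1) := rfl
        have hne : ¬ (seen.getD name 0 + 1 = 1) := by omega
        simp only [hc, if_true, hmod, if_neg hne]
        rw [PySem.Dict.getD_insert]
        simp
      · have h0 : seen.getD name 0 = 0 := PySem.Dict.getD_of_not_contains seen 0 (by simpa using hc)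
        simp [hc, h0]
    have hinv' : bcnInv (seen.insert name (seen.getD name 0 + 1)) := by
      apply bcnInv_insert _ _ _ _ hinv
      by_cases hc : seen.contains name
      · have := hinv name hc; omega
      · rw [PySem.Dict.getD_of_not_contains seen 0 (by simpa using hc)]; omega
    calc ((((a, b) :: rest).foldl bcnStepA (acc, seen, prev))).1
        = (rest.foldl bcnStepA (bcnStepA (acc, seen, prev) (a, b))).1 := by
          simp [List.foldl_cons]
      _ = acc ++ bcnDedup seen ((bcnFill prev ((a, b) :: rest)).map bcnRaw) := by
          rw [hstep, ih _ _ _ hinv']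
          show acc ++ _ ++ _ = acc ++ bcnDedup seen (((prev', sub) :: bcnFill prev' rest).map bcnRaw)
          simp only [List.map_cons, ← hname, bcnDedup, List.append_assoc, List.cons_append,
            List.nil_append]


-- row0[:len(row1)] is the first components of zip(row0,row1) (and symmetrically)
theorem bcn_take_fst : ∀ (r0 r1 : List String), r0.take r1.length = (r0.zip r1).map Prod.fst := by
  intro r0; induction r0 with
  | nil => intro r1; simp
  | cons x xs ih =>
    intro r1; cases r1 with
    | nil => simp
    | cons y ys => simp [ih ys]

theorem bcn_take_snd : ∀ (r0 r1 : List String), r1.take r0.length = (r0.zip r1).map Prod.snd := by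
  intro r0; induction r0 with
  | nil => intro r1; simp
  | cons x xs ih =>
    intro r1; cases r1 with
    | nil => simp
    | cons y ys => simp [ih ys]

-- next((x for x in reversed(xs) if x), prev) = keep-last-non-empty fold over xs
theorem bcn_find_rev (xs : List String) (prev : String) :
    ((xs.reverse.find? (fun x => decide (x ≠ ""))).getD prev)
      = xs.foldl (fun p q => if q = "" then p else q) prev := by
  induction xs using List.reverseRecOn with
  | nil => simp
  | append_singleton ys y ih =>
    by_cases hy : y = ""
    · simpa [hy] using ih
    · simp [hy]

theorem bcn_fill_length : ∀ (l : List (String × String)) (prev : String),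
    (bcnFill prev l).length = l.length := by
  intro l; induction l with
  | nil => intro prev; simp [bcnFill]
  | cons p rest ih => obtain ⟨a, b⟩ := p; intro prev; simp [bcnFill, ih]

theorem bcn_fill_get : ∀ (l : List (String × String)) (prev : String) (i : Nat)
    (h : i < l.length),
    (bcnFill prev l)[i]'(by rw [bcn_fill_length]; exact h)
      = (((l.take (i+1)).map (fun p => PySem.Str.strip p.1)).foldl
           (fun p q => if q = "" then p else q) prev,
         PySem.Str.strip (l[i].2)) := by
  intro l; induction l with
  | nil => intro prev i h; simp at h
  | cons p rest ih =>
    obtain ⟨a, b⟩ := p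
    intro prev i h
    cases i with
    | zero => simp [bcnFill]
    | succ j =>
      have hj : j < rest.length := by simpa using h
      simpa [bcnFill] using ih _ j hj

theorem bcn_dedup_length : ∀ (ns : List String) (seen : PySem.Dict String Int),
    (bcnDedup seen ns).length = ns.length := by
  intro ns; induction ns with
  | nil => intro seen; simp [bcnDedup]
  | cons n rest ih => intro seen; simp [bcnDedup, ih]

theorem bcn_dedup_get : ∀ (ns : List String) (seen : PySem.Dict String Int) (i : Nat)
    (h : i < ns.length),
    (bcnDedup seen ns)[i]'(by rw [bcn_dedup_length]; exact h)
      = (if seen.getD ns[i] 0 + ((ns.take i).count ns[i] : Int) = 0 then ns[i]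
         else ns[i] ++ "__"
              ++ PySem.Int.toStr (seen.getD ns[i] 0 + ((ns.take i).count ns[i] : Int) + 1)) := by
  intro ns; induction ns with
  | nil => intro seen i h; simp at h
  | cons n rest ih =>
    intro seen i h
    cases i with
    | zero =>
      simp only [bcnDedup, List.getElem_cons_zero, List.take_zero, List.count_nil,
        Nat.cast_zero, add_zero]
      by_cases hc : seen.getD n 0 + 1 = 1
      · rw [if_pos hc, if_pos (by omega)]
      · rw [if_neg hc, if_neg (by omega)]
    | succ j =>
      have hj : j < rest.length := by simpa using h
      have hih := ih (seen.insert n (seen.getD n 0 + 1)) j hj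
      simp only [bcnDedup, List.getElem_cons_succ]
      rw [hih]
      have hkey : (seen.insert n (seen.getD n 0 + 1)).getD rest[j] 0
            + ((rest.take j).count rest[j] : Int)
          = seen.getD rest[j] 0 + ((((n :: rest).take (j+1)).count rest[j]) : Int) := by
        rw [PySem.Dict.getD_insert]
        simp only [List.take_succ_cons, List.count_cons]
        by_cases he : rest[j] = n
        · rw [if_pos he, he]; simp; omega
        · simp [he, Ne.symm he]
      rw [hkey]


-- B's name-building pass equals the staged fill/raw composition
theorem bcn_names_eq (row0 row1 : List String) :
    bcnNames row0 row1 = (bcnFill "" (row0.zip row1)).map bcnRaw := by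
  have hqs : bcnQs row0 row1 = (row0.zip row1).map (fun p => PySem.Str.strip p.1) := by
    unfold bcnQs
    rw [PySem.List.len_eq, PySem.List.slice_to_natCast, bcn_take_fst row0 row1, List.map_map]
    rfl
  have hsubs : bcnSubs row0 row1 = (row0.zip row1).map (fun p => PySem.Str.strip p.2) := by
    unfold bcnSubs
    rw [PySem.List.len_eq, PySem.List.slice_to_natCast, bcn_take_snd row0 row1, List.map_map]
    rfl
  apply List.ext_getElem?
  intro i
  simp only [bcnNames, hsubs, List.getElem?_map, PySem.List.getElem?_enumerate]
  by_cases hi : i < (row0.zip row1).length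
  · have hif : i < (bcnFill "" (row0.zip row1)).length := by
      rw [bcn_fill_length]; exact hi
    rw [List.getElem?_eq_getElem hi, List.getElem?_eq_getElem hif]
    simp only [Option.map_some]
    refine congrArg some ?_
    show (if PySem.Str.strip (row0.zip row1)[i].2 ≠ "" ∧
            PySem.Str.lower (PySem.Str.strip (row0.zip row1)[i].2) ≠ "response" then
          ((PySem.List.slice (bcnQs row0 row1) none (some ((0 : Int) + (i : Int) + 1))).reverse.find?
              (fun x => decide (x ≠ ""))).getD "" ++ "__" ++ PySem.Str.strip (row0.zip row1)[i].2
        else ((PySem.List.slice (bcnQs row0 row1) none (some ((0 : Int) + (i : Int) + 1))).reverse.find?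
              (fun x => decide (x ≠ ""))).getD "")
      = bcnRaw ((bcnFill "" (row0.zip row1))[i]'hif)
    have hb : (0 : Int) + (i : Int) + 1 = ((i + 1 : Nat) : Int) := by push_cast; ring
    rw [hb, PySem.List.slice_to_natCast, hqs, ← List.map_take, bcn_find_rev,
      bcn_fill_get _ _ i hi]
    simp [bcnRaw]
  · have hif : ¬ i < (bcnFill "" (row0.zip row1)).length := by
      rw [bcn_fill_length]; exact hi
    rw [List.getElem?_eq_none (by omega), List.getElem?_eq_none (by omega)]
    simp

-- B's dedup pass equals the counter dedup, for any name list
theorem bcn_out_eq (ns : List String) :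
    (PySem.List.enumerate ns 0).map (fun p =>
        let c := PySem.List.count (PySem.List.slice ns none (some p.1)) p.2
        if c = 0 then p.2 else p.2 ++ "__" ++ PySem.Int.toStr ((c : Int) + 1))
      = bcnDedup PySem.Dict.empty ns := by
  apply List.ext_getElem?
  intro i
  simp only [List.getElem?_map, PySem.List.getElem?_enumerate]
  by_cases hi : i < ns.length
  · have hid : i < (bcnDedup PySem.Dict.empty ns).length := by
      rw [bcn_dedup_length]; exact hi
    rw [List.getElem?_eq_getElem hi, List.getElem?_eq_getElem hid]
    simp only [Option.map_some]
    refine congrArg some ?_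
    show (let c := PySem.List.count (PySem.List.slice ns none (some ((0 : Int) + (i : Int)))) ns[i]
          if c = 0 then ns[i] else ns[i] ++ "__" ++ PySem.Int.toStr ((c : Int) + 1))
      = (bcnDedup PySem.Dict.empty ns)[i]'hid
    have hb : (0 : Int) + (i : Int) = ((i : Nat) : Int) := by ring
    rw [hb, PySem.List.slice_to_natCast, PySem.List.count_eq, bcn_dedup_get _ _ i hi]
    have h0 : (PySem.Dict.empty : PySem.Dict String Int).getD ns[i] 0 = 0 := rfl
    rw [h0]
    by_cases hc : (ns.take i).count ns[i] = 0
    · simp [hc]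
    · simp only [hc, if_false, zero_add]
      rw [if_neg (by exact_mod_cast hc)]
  · rw [List.getElem?_eq_none (by omega), List.getElem?_eq_none (by rw [bcn_dedup_length]; omega)]
    simp

-- ===== VERDICT (by name: the statement is the Claim_ definition above) =====
theorem build_col_names_py_spec : Claim_equal_build_col_names_py := by
  intro row0 row1 _
  unfold Spec_build_col_names_py build_col_names_py build_col_names_py_alt
  rw [bcn_main _ [] PySem.Dict.empty "" (by
    intro k hk
    simp [PySem.Dict.contains] at hk ⊢
    simp_all [PySem.Dict.empty])]
  rw [bcn_out_eq, bcn_names_eq]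
  simp
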